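-- pv_equiv track=rewrite | github.com/eylon696/Machine-learning | lab 7/lab_7_0_SVM.py | change_lab
-- ===== SOURCE A (Python) =====
-- def change_lab(label):
--     new_y = []
--     count = 0
--     dictionaryArr = dict()
--     for key in label:
--         if not (key in dictionaryArr):
--             dictionaryArr[key] = dictionaryArr.get(key, count)
--             count += 1
--         val = dictionaryArr[key]
--         new_y.append(val)
--     return new_y
-- ===== SOURCE B (Python) =====
-- def change_lab(label):
--     seq = list(label)
--     return [len(set(seq[:seq.index(k)])) for k in seq]
-- ===== Notes on version B (the rewrite author's own statement) =====
-- stated objective: alternative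
-- what changed: A builds a value-to-code dictionary with an explicit counter in one stateful loop; B uses no dictionary or counter at all: each element's code is computed independently as the number of distinct labels strictly before its first occurrence, len(set(seq[:seq.index(k)])).
import Mathlib
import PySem

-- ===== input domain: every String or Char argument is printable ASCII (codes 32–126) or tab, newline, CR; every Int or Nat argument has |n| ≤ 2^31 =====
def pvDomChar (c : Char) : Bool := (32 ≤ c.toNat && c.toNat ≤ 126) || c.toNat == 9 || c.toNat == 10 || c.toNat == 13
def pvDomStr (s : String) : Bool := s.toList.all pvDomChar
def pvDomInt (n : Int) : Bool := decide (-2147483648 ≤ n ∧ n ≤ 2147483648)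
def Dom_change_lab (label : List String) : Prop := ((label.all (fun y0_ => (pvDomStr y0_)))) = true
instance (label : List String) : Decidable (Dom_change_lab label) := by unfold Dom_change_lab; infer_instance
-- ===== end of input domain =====

-- B drops A's dictionary-and-counter loop entirely: each element's code is the number of
-- distinct labels strictly before its first occurrence; objective: alternative (O(n^2), no shared state).

-- ===== PORT A =====
-- A's loop body: state is (new_y, count, dictionaryArr)
def changeLabStep (st : List Int × Int × PySem.Dict String Int) (key : String) :
    List Int × Int × PySem.Dict String Int :=
  let new_y := st.1
  let count := st.2.1
  let d := st.2.2
  let cd : Int × PySem.Dict String Int :=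
    if ¬ d.contains key then (count + 1, d.insert key (d.getD key count)) else (count, d)
  -- dictionaryArr[key]: key is always present at this point, so the 0 default is never used
  let val := cd.2.getD key 0
  (new_y ++ [val], cd.1, cd.2)

def change_lab (label : List String) : List Int :=
  (label.foldl changeLabStep ([], 0, PySem.Dict.empty)).1

-- ===== PORT B =====
def change_lab_alt (label : List String) : List Int :=
  let seq := label
  seq.map (fun k =>
    -- seq.index(k): k is drawn from seq, so it is always found; the 0 default is never used
    let j : Nat := (PySem.List.index? seq k).getD 0
    ((PySem.Set.ofList (PySem.List.slice seq none (some (j : Int)))).length : Int))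

-- ===== PRECONDITION & SPEC =====
def Spec_change_lab (label : List String) (out : List Int) : Prop := out = change_lab_alt label
instance (label : List String) (out : List Int) : Decidable (Spec_change_lab label out) := by unfold Spec_change_lab; infer_instance

-- ===== CLAIM (what is proved, stated in full; the proofs are below) =====
def Claim_equal_change_lab : Prop := ∀ (label : List String), Dom_change_lab label → Spec_change_lab label (change_lab label)

-- ===== LEMMAS AND PROOFS =====

-- the dict A builds, expressed from a nodup list of keys
def bdict (us : List String) (s : Int) (d : PySem.Dict String Int) : PySem.Dict String Int :=
  us.foldl (fun (p : PySem.Dict String Int × Int) u => (p.1.insert u p.2, p.2 + 1)) (d, s) |>.1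

-- (bdict is only a proof device for characterising A's loop state)
def bdictP (us : List String) (s : Int) (d : PySem.Dict String Int) : PySem.Dict String Int × Int :=
  us.foldl (fun (p : PySem.Dict String Int × Int) u => (p.1.insert u p.2, p.2 + 1)) (d, s)

theorem bdictP_snd (us : List String) (s : Int) (d : PySem.Dict String Int) :
    (bdictP us s d).2 = s + us.length := by
  induction us generalizing s d with
  | nil => simp [bdictP]
  | cons a t ih => simp [bdictP] at ih ⊢; rw [ih]; ring

theorem bdict_getD (us : List String) (hnd : us.Nodup) (s : Int) (d : PySem.Dict String Int)
    (k : String) (dflt : Int) :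
    (bdictP us s d).1.getD k dflt = if k ∈ us then s + (us.idxOf k : Int) else d.getD k dflt := by
  induction us generalizing s d with
  | nil => simp [bdictP]
  | cons a t ih =>
    have hnd' := hnd
    simp only [List.nodup_cons] at hnd'
    simp only [bdictP, List.foldl_cons]
    rw [show (t.foldl (fun (p : PySem.Dict String Int × Int) u => (p.1.insert u p.2, p.2 + 1))
          (d.insert a s, s + 1)) = bdictP t (s + 1) (d.insert a s) from rfl, ih hnd'.2]
    by_cases hk : k = a
    · subst hk
      simp [hnd'.1, PySem.Dict.getD_insert_self]
    · by_cases hm : k ∈ t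
      · simp [hm, hk, List.idxOf_cons_ne _ (by simpa using (Ne.symm hk))]
        ring
      · simp [hm, hk, PySem.Dict.getD_insert_of_ne d s dflt hk]

theorem bdict_contains (us : List String) (s : Int) (d : PySem.Dict String Int) (k : String) :
    (bdictP us s d).1.contains k = (decide (k ∈ us) || d.contains k) := by
  induction us generalizing s d with
  | nil => simp [bdictP]
  | cons a t ih =>
    simp only [bdictP, List.foldl_cons]
    rw [show (t.foldl (fun (p : PySem.Dict String Int × Int) u => (p.1.insert u p.2, p.2 + 1))
          (d.insert a s, s + 1)) = bdictP t (s + 1) (d.insert a s) from rfl, ih]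
    by_cases hk : k = a
    · subst hk
      simp
    · have hb : (k == a) = false := beq_eq_false_iff_ne.mpr hk
      simp [PySem.Dict.contains_insert, hb, hk, List.mem_cons]

-- the loop state of A after processing prefix p, expressed through dedup
def stateOf (p : List String) : List Int × Int × PySem.Dict String Int :=
  (p.map (fun k => ((PySem.List.dedup p).idxOf k : Int)),
   ((PySem.List.dedup p).length : Int),
   (bdictP (PySem.List.dedup p) 0 PySem.Dict.empty).1)

theorem dedup_append_mem (p : List String) (x : String) (h : x ∈ p) :
    PySem.List.dedup (p ++ [x]) = PySem.List.dedup p := by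
  simp only [PySem.List.dedup_eq_ofList, PySem.Set.ofList_append, PySem.Set.update_cons,
    PySem.Set.update_nil]
  exact PySem.Set.add_of_mem (by simpa [PySem.Set.mem_ofList] using h)

theorem dedup_append_not_mem (p : List String) (x : String) (h : x ∉ p) :
    PySem.List.dedup (p ++ [x]) = PySem.List.dedup p ++ [x] := by
  simp only [PySem.List.dedup_eq_ofList, PySem.Set.ofList_append, PySem.Set.update_cons,
    PySem.Set.update_nil]
  exact PySem.Set.add_of_not_mem (by simpa [PySem.Set.mem_ofList] using h)

theorem idxOf_append_self (us : List String) (x : String) (h : x ∉ us) :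
    (us ++ [x]).idxOf x = us.length := by
  simp [List.idxOf_append, h]

theorem bdictP_append_singleton (us : List String) (u : String) (s : Int)
    (d : PySem.Dict String Int) :
    (bdictP (us ++ [u]) s d).1 = (bdictP us s d).1.insert u (s + us.length) := by
  simp only [bdictP, List.foldl_append, List.foldl_cons, List.foldl_nil]
  rw [show (us.foldl (fun (p : PySem.Dict String Int × Int) u => (p.1.insert u p.2, p.2 + 1))
       (d, s)) = bdictP us s d from rfl, bdictP_snd]

theorem step_stateOf (p : List String) (x : String) :
    changeLabStep (stateOf p) x = stateOf (p ++ [x]) := by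
  by_cases hx : x ∈ p
  · have hdd : PySem.List.dedup (p ++ [x]) = PySem.List.dedup p := dedup_append_mem p x hx
    have hxd : x ∈ PySem.List.dedup p := (PySem.List.mem_dedup p x).mpr hx
    have hc : (bdictP (PySem.List.dedup p) 0 PySem.Dict.empty).1.contains x = true := by
      rw [bdict_contains]
      simp [hx]
    have hval : (bdictP (PySem.List.dedup p) 0 PySem.Dict.empty).1.getD x 0
        = ((PySem.List.dedup p).idxOf x : Int) := by
      rw [bdict_getD _ (PySem.List.nodup_dedup p), if_pos hxd, zero_add]
    simp only [changeLabStep, stateOf, hdd, hc]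
    rw [if_neg (by simp)]
    simp only [hval, List.map_append, List.map_cons, List.map_nil]
  · have hdd : PySem.List.dedup (p ++ [x]) = PySem.List.dedup p ++ [x] :=
      dedup_append_not_mem p x hx
    have hxd : x ∉ PySem.List.dedup p := fun hmem => hx ((PySem.List.mem_dedup p x).mp hmem)
    have hc : (bdictP (PySem.List.dedup p) 0 PySem.Dict.empty).1.contains x = false := by
      rw [bdict_contains]
      simp [hx]
    have hgd : (bdictP (PySem.List.dedup p) 0 PySem.Dict.empty).1.getD x
          ((PySem.List.dedup p).length : Int) = ((PySem.List.dedup p).length : Int) := by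
      rw [bdict_getD _ (PySem.List.nodup_dedup p), if_neg hxd, PySem.Dict.getD_empty]
    simp only [changeLabStep, stateOf, hdd, hc]
    rw [if_pos (by simp)]
    simp only [hgd, bdictP_append_singleton, zero_add, PySem.Dict.getD_insert_self]
    refine Prod.ext ?_ (Prod.ext ?_ rfl)
    · simp only [List.map_append, List.map_cons, List.map_nil]
      congr 1
      · exact List.map_congr_left (fun k hk => by
          rw [List.idxOf_append_of_mem ((PySem.List.mem_dedup p k).mpr hk)])
      · rw [idxOf_append_self _ _ hxd]
    · simp only [List.length_append, List.length_cons, List.length_nil]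
      push_cast
      ring

theorem loop_inv (rest p : List String) :
    rest.foldl changeLabStep (stateOf p) = stateOf (p ++ rest) := by
  induction rest generalizing p with
  | nil => simp
  | cons x rest ih =>
    rw [List.foldl_cons, step_stateOf, ih]
    congr 1
    simp

theorem stateOf_nil : stateOf [] = ([], 0, PySem.Dict.empty) := rfl

theorem change_lab_eq (label : List String) :
    change_lab label = label.map (fun k => ((PySem.List.dedup label).idxOf k : Int)) := by
  rw [change_lab, ← stateOf_nil, loop_inv, List.nil_append, stateOf]

-- dedup of an extended list extends dedup of the prefix
theorem ofList_append_exists (y x : List String) :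
    ∃ s, PySem.Set.ofList (x ++ y) = PySem.Set.ofList x ++ s := by
  rw [PySem.Set.ofList_append, PySem.Set.update_eq_append_filter]
  exact ⟨_, rfl⟩

theorem change_lab_alt_eq (label : List String) :
    change_lab_alt label = label.map (fun k => ((PySem.List.dedup label).idxOf k : Int)) := by
  rw [change_lab_alt]
  refine List.map_congr_left (fun k hk => ?_)
  obtain ⟨j, hj⟩ := (PySem.List.index?_isSome_iff label k).mpr hk |> Option.isSome_iff_exists.mp
  obtain ⟨pre, suf, hsplit, hlen, hnpre⟩ := (PySem.List.index?_eq_some_iff label k j).mp hj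
  simp only [hj, Option.getD_some]
  rw [PySem.List.slice_to_natCast]
  have htake : label.take j = pre := by
    rw [hsplit, ← hlen, List.take_left]
  rw [htake]
  -- the RHS index: label = (pre ++ [k]) ++ suf, and ofList extends the ofList of a prefix
  have hknot : k ∉ PySem.Set.ofList pre := fun h => hnpre ((PySem.Set.mem_ofList pre k).mp h)
  obtain ⟨s, hs⟩ := ofList_append_exists suf (pre ++ [k])
  have hpk : PySem.Set.ofList (pre ++ [k]) = PySem.Set.ofList pre ++ [k] := by
    rw [PySem.Set.ofList_append_singleton, PySem.Set.add_of_not_mem hknot]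
  have hlab : PySem.List.dedup label = (PySem.Set.ofList pre ++ [k]) ++ s := by
    rw [PySem.List.dedup_eq_ofList, hsplit, show pre ++ k :: suf = (pre ++ [k]) ++ suf by simp,
      hs, hpk]
  rw [hlab, List.idxOf_append_of_mem (by simp), idxOf_append_self _ _ hknot]

-- ===== VERDICT (by name: the statement is the Claim_ definition above) =====
theorem change_lab_spec : Claim_equal_change_lab := by
  intro label _
  unfold Spec_change_lab
  rw [change_lab_eq, change_lab_alt_eq]
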